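-- pv_equiv track=rewrite | github.com/open-cu/code-cheating | course/1/subject_python/N/40501-39186.py | can_read_word
-- ===== SOURCE A (Python) =====
-- def can_read_word(circle, word):
--     for i in range(len(circle)):
--         valid_start = True
--         for j in range(len(word)):
--             if circle[(i + j) % len(circle)] != word[j]:
--                 valid_start = False
--                 break
--         if valid_start:
--             return True
--     return False
-- ===== SOURCE B (Python) =====
-- def can_read_word(circle, word):
--     if not circle:
--         return False
--     return word in circle * (len(word) // len(circle) + 2)
-- ===== Notes on version B (the rewrite author's own statement) =====
-- stated objective: faster
-- what changed: Replaces the nested start-offset/character loops over the circle with a single substring test of word inside the circle repeated enough times to cover every circular start, using Python's fast native substring search.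
import Mathlib
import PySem

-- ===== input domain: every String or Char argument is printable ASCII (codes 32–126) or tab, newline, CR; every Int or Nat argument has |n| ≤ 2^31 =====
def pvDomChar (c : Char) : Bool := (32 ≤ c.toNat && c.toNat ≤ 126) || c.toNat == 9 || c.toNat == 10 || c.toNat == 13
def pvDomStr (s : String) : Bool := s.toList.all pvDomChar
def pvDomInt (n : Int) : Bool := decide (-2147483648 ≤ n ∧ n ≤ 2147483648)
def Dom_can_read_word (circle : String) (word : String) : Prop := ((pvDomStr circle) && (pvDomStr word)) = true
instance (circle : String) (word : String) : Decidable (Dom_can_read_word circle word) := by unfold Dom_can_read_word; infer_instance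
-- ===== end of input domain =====

-- B replaces A's nested offset/character scan of the circle by one substring test of word
-- inside the circle repeated enough times to cover every circular start (objective: faster).


-- ===== PORT A =====
-- inner loop 'for j in range(len(word)): if circle[(i+j) % len(circle)] != word[j]: …break'
def pvAinner (cs ws : List Char) (i : Int) : List Int → Bool
  | [] => true
  | j :: js =>
    if PySem.List.pyGetD cs (PySem.Int.mod (i + j) (PySem.List.len cs)) 'A' ≠ PySem.List.pyGetD ws j 'A'
    then false
    else pvAinner cs ws i js

-- outer loop 'for i in range(len(circle)): … if valid_start: return True'
def pvAouter (cs ws : List Char) : List Int → Bool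
  | [] => false
  | i :: is =>
    if pvAinner cs ws i (PySem.List.pyRange 0 (PySem.List.len ws) 1) then true
    else pvAouter cs ws is

def can_read_word (circle : String) (word : String) : Bool :=
  pvAouter circle.toList word.toList
    (PySem.List.pyRange 0 (PySem.List.len circle.toList) 1)

-- ===== PORT B =====
def can_read_word_alt (circle : String) (word : String) : Bool :=
  if circle.toList = [] then false
  else
    PySem.Chars.isIn word.toList
      (PySem.List.pyRepeat circle.toList
        (PySem.Int.floordiv (PySem.List.len word.toList) (PySem.List.len circle.toList) + 2))

-- ===== PRECONDITION & SPEC =====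
def Spec_can_read_word (circle : String) (word : String) (out : Bool) : Prop := out = can_read_word_alt circle word
instance (circle : String) (word : String) (out : Bool) : Decidable (Spec_can_read_word circle word out) := by unfold Spec_can_read_word; infer_instance

-- ===== CLAIM (what is proved, stated in full; the proofs are below) =====
def Claim_equal_can_read_word : Prop := ∀ (circle : String) (word : String), Dom_can_read_word circle word → Spec_can_read_word circle word (can_read_word circle word)

-- ===== LEMMAS AND PROOFS =====

-- circular match predicate shared by both characterisations
def pvMatch (cs ws : List Char) (i : Nat) : Prop :=
  ∀ j, j < ws.length → cs[(i + j) % cs.length]? = ws[j]?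

-- A's inner loop is a conjunction over the remaining j's
theorem pvAinner_eq_all (cs ws : List Char) (i : Int) (js : List Int) :
    pvAinner cs ws i js =
      js.all (fun j => decide (PySem.List.pyGetD cs (PySem.Int.mod (i + j) (PySem.List.len cs)) 'A'
                        = PySem.List.pyGetD ws j 'A')) := by
  induction js with
  | nil => rfl
  | cons j js ih =>
    simp only [pvAinner, List.all_cons, ih]
    by_cases h : PySem.List.pyGetD cs (PySem.Int.mod (i + j) (PySem.List.len cs)) 'A'
                  = PySem.List.pyGetD ws j 'A'
    · simp only [PySem.List.len_eq] at h; simp [h]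
    · simp only [PySem.List.len_eq] at h; simp [h]

-- A's outer loop is a disjunction over the remaining i's
theorem pvAouter_eq_any (cs ws : List Char) (is : List Int) :
    pvAouter cs ws is =
      is.any (fun i => pvAinner cs ws i (PySem.List.pyRange 0 (PySem.List.len ws) 1)) := by
  induction is with
  | nil => rfl
  | cons i is ih =>
    simp only [pvAouter, List.any_cons, ih]
    by_cases h : pvAinner cs ws i (PySem.List.pyRange 0 (PySem.List.len ws) 1) = true
    · rw [if_pos h, h, Bool.true_or]
    · rw [if_neg h, Bool.eq_false_iff.mpr h, Bool.false_or]

theorem pvAinner_iff (cs ws : List Char) (hn : cs ≠ []) (i : Nat) :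
    pvAinner cs ws (i : Int) (PySem.List.pyRange 0 (PySem.List.len ws) 1) = true ↔ pvMatch cs ws i := by
  have hn0 : 0 < cs.length := List.length_pos_of_ne_nil hn
  rw [pvAinner_eq_all, List.all_eq_true]
  constructor
  · intro h j hj
    have hmem : (j : Int) ∈ PySem.List.pyRange 0 (PySem.List.len ws) 1 := by
      rw [PySem.List.len_eq, PySem.List.mem_pyRange_one]
      constructor <;> omega
    have := h _ hmem
    simp only [decide_eq_true_eq] at this
    have hcast : (i : Int) + (j : Int) = ((i + j : Nat) : Int) := by push_cast; ring
    rw [hcast, PySem.List.len_eq, PySem.Int.mod_natCast, PySem.List.pyGetD_natCast] at this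
    have hlt : (i + j) % cs.length < cs.length := Nat.mod_lt _ hn0
    rw [List.getD_eq_getElem cs 'A' hlt, PySem.List.pyGetD_natCast,
        List.getD_eq_getElem ws 'A' hj] at this
    rw [List.getElem?_eq_getElem hlt, List.getElem?_eq_getElem hj, this]
  · intro h j hmem
    rw [PySem.List.len_eq, PySem.List.mem_pyRange_one] at hmem
    obtain ⟨h0, hlt⟩ := hmem
    obtain ⟨jn, rfl⟩ : ∃ jn : Nat, j = (jn : Int) := ⟨j.toNat, (Int.toNat_of_nonneg h0).symm⟩
    have hj : jn < ws.length := by exact_mod_cast hlt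
    have := h jn hj
    have hmod : (i + jn) % cs.length < cs.length := Nat.mod_lt _ hn0
    rw [List.getElem?_eq_getElem hmod, List.getElem?_eq_getElem hj, Option.some_inj] at this
    have hcast : (i : Int) + (jn : Int) = ((i + jn : Nat) : Int) := by push_cast; ring
    simp only [decide_eq_true_eq]
    rw [hcast, PySem.List.len_eq, PySem.Int.mod_natCast, PySem.List.pyGetD_natCast,
        PySem.List.pyGetD_natCast, List.getD_eq_getElem cs 'A' hmod,
        List.getD_eq_getElem ws 'A' hj, this]

theorem can_read_word_iff (circle word : String) (hn : circle.toList ≠ []) :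
    can_read_word circle word = true ↔
      ∃ i, i < circle.toList.length ∧ pvMatch circle.toList word.toList i := by
  unfold can_read_word
  rw [pvAouter_eq_any, List.any_eq_true]
  constructor
  · rintro ⟨i, hmem, hin⟩
    rw [PySem.List.len_eq, PySem.List.mem_pyRange_one] at hmem
    obtain ⟨h0, hlt⟩ := hmem
    obtain ⟨im, rfl⟩ : ∃ im : Nat, i = (im : Int) := ⟨i.toNat, (Int.toNat_of_nonneg h0).symm⟩
    exact ⟨im, by exact_mod_cast hlt, (pvAinner_iff _ _ hn im).mp hin⟩
  · rintro ⟨i, hlt, hm⟩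
    refine ⟨(i : Int), ?_, (pvAinner_iff _ _ hn i).mpr hm⟩
    rw [PySem.List.len_eq, PySem.List.mem_pyRange_one]
    constructor <;> omega

-- index into the repeated circle
theorem pvRep_getElem? (cs : List Char) (k p : Nat) (hp : p < k * cs.length) :
    (List.replicate k cs).flatten[p]? = cs[p % cs.length]? := by
  induction k generalizing p with
  | zero => omega
  | succ k ih =>
    rw [List.replicate_succ, List.flatten_cons]
    by_cases h : p < cs.length
    · rw [List.getElem?_append_left h, Nat.mod_eq_of_lt h]
    · have hcs : 0 < cs.length := by
        rcases Nat.eq_zero_or_pos cs.length with h0 | h0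
        · rw [h0, Nat.mul_zero] at hp; omega
        · exact h0
      rw [List.getElem?_append_right (by omega)]
      rw [ih (p - cs.length)
        (by have hs : (k + 1) * cs.length = k * cs.length + cs.length := Nat.succ_mul k cs.length
            omega)]
      congr 1
      conv_rhs => rw [show p = (p - cs.length) + cs.length by omega]
      rw [Nat.add_mod_right]

-- ws is a prefix of R.drop p iff it matches R pointwise from p
theorem pvPrefix_drop_iff (R ws : List Char) (p : Nat) :
    ws <+: R.drop p ↔ ∀ j, j < ws.length → R[p + j]? = ws[j]? := by
  rw [List.prefix_iff_eq_take]
  constructor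
  · intro h j hj
    rw [← List.getElem?_drop]
    conv_rhs => rw [h]
    rw [List.getElem?_take, if_pos hj]
  · intro h
    apply List.ext_getElem?
    intro j
    by_cases hj : j < ws.length
    · rw [List.getElem?_take, if_pos hj, List.getElem?_drop, h j hj]
    · rw [List.getElem?_eq_none (by omega), List.getElem?_eq_none]
      rw [List.length_take]
      omega

theorem can_read_word_alt_iff (circle word : String) (hn : circle.toList ≠ []) :
    can_read_word_alt circle word = true ↔
      ∃ i, i < circle.toList.length ∧ pvMatch circle.toList word.toList i := by
  unfold can_read_word_alt
  rw [if_neg hn]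
  set cs := circle.toList with hcs
  set ws := word.toList with hws
  have hn0 : 0 < cs.length := List.length_pos_of_ne_nil hn
  set n := cs.length
  set m := ws.length
  have hK : PySem.List.pyRepeat cs (PySem.Int.floordiv (PySem.List.len ws) (PySem.List.len cs) + 2)
      = (List.replicate (m / n + 2) cs).flatten := by
    simp only [PySem.List.pyRepeat, PySem.List.len_eq, PySem.Int.floordiv_natCast]
    have ht : (((m / n : Nat) : Int) + 2).toNat = m / n + 2 := by
      generalize m / n = q
      omega
    rw [ht]
  rw [hK]
  set K := m / n + 2 with hKdef
  have hdm : n * (m / n) + m % n = m := Nat.div_add_mod m n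
  have hmn : m % n < n := Nat.mod_lt _ hn0
  have hKn : K * n = n * (m / n) + 2 * n := by rw [hKdef]; ring
  rw [← PySem.Chars.exists_prefix_drop_iff_isIn]
  constructor
  · rintro ⟨p, hp⟩
    rw [pvPrefix_drop_iff] at hp
    refine ⟨p % n, Nat.mod_lt _ hn0, ?_⟩
    intro j hj
    have hsome := hp j hj
    rw [List.getElem?_eq_getElem hj] at hsome
    obtain ⟨hplt, -⟩ := List.getElem?_eq_some_iff.mp hsome
    have hRlen : (List.replicate K cs).flatten.length = K * n := by
      simp [List.length_flatten, List.map_replicate]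
      rfl
    rw [hRlen] at hplt
    have := pvRep_getElem? cs K (p + j) hplt
    rw [this] at hsome
    rw [List.getElem?_eq_getElem hj]
    have hmodeq : (p % n + j) % n = (p + j) % n := Nat.mod_add_mod p n j
    rw [hmodeq, hsome]
  · rintro ⟨i, hi, hm⟩
    refine ⟨i, ?_⟩
    rw [pvPrefix_drop_iff]
    intro j hj
    have hlt : i + j < K * n := by omega
    rw [pvRep_getElem? cs K (i + j) hlt]
    exact hm j hj

-- ===== VERDICT (by name: the statement is the Claim_ definition above) =====
theorem can_read_word_spec : Claim_equal_can_read_word := by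
  intro circle word _
  unfold Spec_can_read_word
  by_cases hn : circle.toList = []
  · simp [can_read_word, can_read_word_alt, hn, pvAouter]
  · exact Bool.eq_iff_iff.mpr
      ((can_read_word_iff circle word hn).trans (can_read_word_alt_iff circle word hn).symm)
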